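-- pv_equiv track=rewrite | github.com/rafiya618/Food-Allergy-Detector | food_allery_analysis.py | find_probable_culprits
-- ===== SOURCE A (Python) =====
-- def find_probable_culprits(food_issue_map, foods_dict, allergies_dict, daily_data):
--     culprit_scores = {}
--     for food, issues in food_issue_map.items():
--         allergies = foods_dict.get(food, [])
--         possible_issues = set()
--         for allergy in allergies:
--             possible_issues.update(allergies_dict.get(allergy, []))
--         match_count = sum(1 for issue in issues if issue in possible_issues)
--         culprit_scores[food] = match_count
--
--     max_score = max(culprit_scores.values(), default=0)
--     probable_culprits = [food for food, score in culprit_scores.items() if score == max_score and score > 0]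
--     return probable_culprits, culprit_scores
-- ===== SOURCE B (Python) =====
-- def find_probable_culprits(food_issue_map, foods_dict, allergies_dict, daily_data):
--     culprit_scores = {}
--     buckets = {}
--     for food, issues in food_issue_map.items():
--         # multiplicity table of this food's reported issues
--         counts = {}
--         for issue in issues:
--             counts[issue] = counts.get(issue, 0) + 1
--         # walk the allergen issue lists, deduplicating on the fly, and
--         # accumulate each fresh issue's multiplicity
--         seen = set()
--         score = 0
--         for allergy in foods_dict.get(food, []):
--             for issue in allergies_dict.get(allergy, []):
--                 if issue not in seen:
--                     seen.add(issue)
--                     score += counts.get(issue, 0)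
--         culprit_scores[food] = score
--         buckets.setdefault(score, []).append(food)
--     top = max(buckets, default=0)
--     return (buckets[top] if top > 0 else []), culprit_scores
-- ===== Notes on version B (the rewrite author's own statement) =====
-- stated objective: alternative
-- what changed: Inverts the per-food counting (a multiplicity dict of the reported issues is built once and fresh allergen issues pull their multiplicity from it while a seen-set deduplicates, instead of building a possible-issues set and testing every reported issue against it) and replaces the max-then-filter tail with grouping foods into score buckets and indexing the bucket of the maximal positive score.
import Mathlib
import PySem

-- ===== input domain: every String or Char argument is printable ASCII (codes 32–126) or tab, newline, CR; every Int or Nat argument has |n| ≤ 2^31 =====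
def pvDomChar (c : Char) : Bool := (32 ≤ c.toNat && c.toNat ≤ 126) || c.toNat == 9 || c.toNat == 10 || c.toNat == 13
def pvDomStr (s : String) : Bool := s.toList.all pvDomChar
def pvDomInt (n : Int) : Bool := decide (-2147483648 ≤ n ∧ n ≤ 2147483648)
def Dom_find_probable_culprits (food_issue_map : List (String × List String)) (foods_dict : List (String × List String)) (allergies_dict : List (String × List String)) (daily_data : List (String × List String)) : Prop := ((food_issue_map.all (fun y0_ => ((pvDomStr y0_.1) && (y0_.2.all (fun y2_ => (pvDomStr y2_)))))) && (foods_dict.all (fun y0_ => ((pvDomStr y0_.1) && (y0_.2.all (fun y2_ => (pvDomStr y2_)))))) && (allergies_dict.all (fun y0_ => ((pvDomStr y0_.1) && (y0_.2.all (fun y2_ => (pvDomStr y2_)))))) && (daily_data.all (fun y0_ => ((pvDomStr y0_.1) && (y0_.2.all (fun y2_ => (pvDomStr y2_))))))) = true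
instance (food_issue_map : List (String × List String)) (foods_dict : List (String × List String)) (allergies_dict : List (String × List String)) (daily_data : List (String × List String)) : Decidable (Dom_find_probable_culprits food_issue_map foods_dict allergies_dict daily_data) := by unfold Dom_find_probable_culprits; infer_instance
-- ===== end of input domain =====

-- B inverts A's per-food counting (multiplicity dict of the reported issues + on-the-fly
-- dedup of the allergen issue lists, instead of a possible-issues set tested against every
-- reported issue) and replaces A's max-then-filter tail with score buckets indexed at the
-- maximal positive score; same results, a genuinely different traversal (objective: alternative).

-- ===== PORT A =====
-- per-food match count of A: possible_issues = union of allergies_dict entries of the food's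
-- allergies; match_count = sum(1 for issue in issues if issue in possible_issues)
def pvScore (fd ad : PySem.Dict String (List String)) (food : String) (issues : List String) : Int :=
  let allergies := fd.getD food []
  let possible_issues :=
    allergies.foldl (fun s a => PySem.Set.update s (ad.getD a [])) PySem.Set.empty
  ((issues.filter (fun issue => PySem.Set.contains possible_issues issue)).map
      (fun _ => (1 : Int))).sum

def find_probable_culprits (food_issue_map : List (String × List String)) (foods_dict : List (String × List String)) (allergies_dict : List (String × List String)) (daily_data : List (String × List String)) : List String × (List (String × Int)) :=
  let fd := PySem.Dict.ofList foods_dict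
  let ad := PySem.Dict.ofList allergies_dict
  let culprit_scores :=
    (PySem.Dict.ofList food_issue_map).items.foldl
      (fun d fi => d.insert fi.1 (pvScore fd ad fi.1 fi.2)) (PySem.Dict.empty : PySem.Dict String Int)
  let max_score : Int := PySem.List.maxD culprit_scores.values (fun v => v) 0
  let probable_culprits :=
    (culprit_scores.items.filter (fun (p : String × Int) => decide (p.2 = max_score ∧ 0 < p.2))).map (fun p => p.1)
  (probable_culprits, culprit_scores.items)

-- ===== PORT B =====
-- per-food match count of B: counts = multiplicity dict of issues; then walk the allergen
-- issue lists deduplicating with a seen-set, adding each fresh issue's multiplicity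
def pvAltScore (fd ad : PySem.Dict String (List String)) (food : String) (issues : List String) : Int :=
  let counts : PySem.Dict String Int :=
    issues.foldl (fun c i => c.insert i (c.getD i 0 + 1)) PySem.Dict.empty
  let st :=
    (fd.getD food []).foldl
      (fun st allergy =>
        (ad.getD allergy []).foldl
          (fun st issue =>
            if PySem.Set.contains st.1 issue then st
            else (PySem.Set.add st.1 issue, st.2 + counts.getD issue 0))
          st)
      ((PySem.Set.empty : PySem.Set String), (0 : Int))
  st.2

def find_probable_culprits_alt (food_issue_map : List (String × List String)) (foods_dict : List (String × List String)) (allergies_dict : List (String × List String)) (daily_data : List (String × List String)) : List String × (List (String × Int)) :=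
  let fd := PySem.Dict.ofList foods_dict
  let ad := PySem.Dict.ofList allergies_dict
  let st :=
    (PySem.Dict.ofList food_issue_map).items.foldl
      (fun st fi =>
        let score := pvAltScore fd ad fi.1 fi.2
        (st.1.insert fi.1 score, st.2.modify score [] (fun b => b ++ [fi.1])))
      ((PySem.Dict.empty : PySem.Dict String Int), (PySem.Dict.empty : PySem.Dict Int (List String)))
  let top : Int := PySem.List.maxD st.2.keys (fun v => v) 0
  ((if 0 < top then st.2.getD top [] else []), st.1.items)

-- ===== PRECONDITION & SPEC =====
def Spec_find_probable_culprits (food_issue_map : List (String × List String)) (foods_dict : List (String × List String)) (allergies_dict : List (String × List String)) (daily_data : List (String × List String)) (out : List String × (List (String × Int))) : Prop := out = find_probable_culprits_alt food_issue_map foods_dict allergies_dict daily_data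
instance (food_issue_map : List (String × List String)) (foods_dict : List (String × List String)) (allergies_dict : List (String × List String)) (daily_data : List (String × List String)) (out : List String × (List (String × Int))) : Decidable (Spec_find_probable_culprits food_issue_map foods_dict allergies_dict daily_data out) := by unfold Spec_find_probable_culprits; infer_instance

-- ===== CLAIM (what is proved, stated in full; the proofs are below) =====
def Claim_equal_find_probable_culprits : Prop := ∀ (food_issue_map : List (String × List String)) (foods_dict : List (String × List String)) (allergies_dict : List (String × List String)) (daily_data : List (String × List String)), Dom_find_probable_culprits food_issue_map foods_dict allergies_dict daily_data → Spec_find_probable_culprits food_issue_map foods_dict allergies_dict daily_data (find_probable_culprits food_issue_map foods_dict allergies_dict daily_data)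

-- ===== LEMMAS AND PROOFS =====

-- A's per-food count seen through a given set s (the body of pvScore at set s)
def pvF (issues : List String) (s : PySem.Set String) : Int :=
  ((issues.filter (fun issue => PySem.Set.contains s issue)).map (fun _ => (1 : Int))).sum

lemma pvF_eq (issues : List String) (s : PySem.Set String) :
    pvF issues s = (issues.countP (fun i => PySem.Set.contains s i) : Int) := by
  unfold pvF
  rw [PySem.List.sum_map_const_int, List.countP_eq_length_filter]
  ring

lemma pvF_aux (s : PySem.Set String) (x : String) (hx : PySem.Set.contains s x = false)
    (l : List String) :
    (l.countP (fun i => PySem.Set.contains (s ++ [x]) i) : Int)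
      = (l.countP (fun i => PySem.Set.contains s i) : Int) + l.count x := by
  induction l with
  | nil => simp
  | cons i t ih =>
    rw [List.countP_cons, List.countP_cons, List.count_cons]
    by_cases hix : i = x
    · subst hix
      have h1 : PySem.Set.contains (s ++ [i]) i = true := by
        simp [PySem.Set.contains]
      rw [h1, hx, if_pos rfl]
      have hbeq : (i == i) = true := by simp
      rw [hbeq, if_pos rfl]
      push_cast
      omega
    · have h1 : PySem.Set.contains (s ++ [x]) i = PySem.Set.contains s i := by
        simp [PySem.Set.contains, hix]
      rw [h1]
      have hbeq : (i == x) = false := by simp [hix]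
      rw [hbeq]
      push_cast
      omega

-- adding a fresh element x to the set raises the count by x's multiplicity in issues
lemma pvF_add (issues : List String) (s : PySem.Set String) (x : String)
    (hx : PySem.Set.contains s x = false) :
    pvF issues (PySem.Set.add s x) = pvF issues s + (issues.count x : Int) := by
  have hadd : PySem.Set.add s x = s ++ [x] := by
    simp only [PySem.Set.add, hx, Bool.false_eq_true, if_false]
  rw [pvF_eq, pvF_eq, hadd]
  exact pvF_aux s x hx issues

-- B's inner dedup loop over one issue list keeps the invariant "state = (s, pvF issues s)"
lemma pvInner (issues : List String) (cnts : PySem.Dict String Int)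
    (hc : ∀ i, cnts.getD i 0 = (issues.count i : Int))
    (L : List String) (s : PySem.Set String) :
    (L.foldl
        (fun st issue =>
          if PySem.Set.contains st.1 issue then st
          else (PySem.Set.add st.1 issue, st.2 + cnts.getD issue 0))
        (s, pvF issues s))
      = (PySem.Set.update s L, pvF issues (PySem.Set.update s L)) := by
  induction L generalizing s with
  | nil => simp [PySem.Set.update]
  | cons x t ih =>
    have hupd : PySem.Set.update s (x :: t) = PySem.Set.update (PySem.Set.add s x) t := by
      simp [PySem.Set.update]
    rw [List.foldl_cons, hupd]
    by_cases hcx : PySem.Set.contains s x = true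
    · have hkeep : PySem.Set.add s x = s := by
        simp only [PySem.Set.add, hcx, if_true]
      have hstep :
          (if PySem.Set.contains (s, pvF issues s).1 x
            then (s, pvF issues s)
            else (PySem.Set.add (s, pvF issues s).1 x,
                  (s, pvF issues s).2 + cnts.getD x 0)) = (s, pvF issues s) :=
        if_pos hcx
      rw [hstep, hkeep]
      exact ih s
    · have hcx' : PySem.Set.contains s x = false := by
        cases h : PySem.Set.contains s x with
        | false => rfl
        | true => exact absurd h hcx
      have hstep :
          (if PySem.Set.contains (s, pvF issues s).1 x
            then (s, pvF issues s)
            else (PySem.Set.add (s, pvF issues s).1 x,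
                  (s, pvF issues s).2 + cnts.getD x 0))
            = (PySem.Set.add s x, pvF issues (PySem.Set.add s x)) := by
        have hne : ¬ (PySem.Set.contains (s, pvF issues s).1 x = true) := by
          rw [hcx']
          simp
        rw [if_neg hne]
        dsimp only
        rw [hc x, pvF_add issues s x hcx']
      rw [hstep]
      exact ih (PySem.Set.add s x)

-- B's outer loop over the allergy list keeps the same invariant
lemma pvOuter (issues : List String) (cnts : PySem.Dict String Int)
    (hc : ∀ i, cnts.getD i 0 = (issues.count i : Int))
    (ad : PySem.Dict String (List String)) (als : List String) (s : PySem.Set String) :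
    (als.foldl
        (fun st allergy =>
          (ad.getD allergy []).foldl
            (fun st issue =>
              if PySem.Set.contains st.1 issue then st
              else (PySem.Set.add st.1 issue, st.2 + cnts.getD issue 0))
            st)
        (s, pvF issues s))
      = (als.foldl (fun s a => PySem.Set.update s (ad.getD a [])) s,
         pvF issues (als.foldl (fun s a => PySem.Set.update s (ad.getD a [])) s)) := by
  induction als generalizing s with
  | nil => rfl
  | cons a t ih =>
    rw [List.foldl_cons, List.foldl_cons]
    rw [pvInner issues cnts hc (ad.getD a []) s]
    exact ih (PySem.Set.update s (ad.getD a []))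

-- the two per-food counts agree
lemma altScore_eq (fd ad : PySem.Dict String (List String)) (food : String)
    (issues : List String) :
    pvAltScore fd ad food issues = pvScore fd ad food issues := by
  unfold pvAltScore pvScore
  dsimp only
  have hc : ∀ i,
      (issues.foldl (fun c i => c.insert i (c.getD i 0 + 1))
        (PySem.Dict.empty : PySem.Dict String Int)).getD i 0 = (issues.count i : Int) := by
    intro i
    rw [PySem.Dict.getD_foldl_insert_add_one]
    simp
  have h0 : pvF issues PySem.Set.empty = 0 := by
    rw [pvF_eq]
    have hcp : issues.countP (fun i => PySem.Set.contains PySem.Set.empty i) = 0 := by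
      simp [PySem.Set.contains, PySem.Set.empty]
    rw [hcp]
    rfl
  have hmain := pvOuter issues _ hc ad (fd.getD food []) PySem.Set.empty
  rw [h0] at hmain
  rw [hmain]
  rfl

-- every per-food score is nonnegative (it is a sum of 1s)
lemma pvScore_nonneg (fd ad : PySem.Dict String (List String)) (food : String)
    (issues : List String) : 0 ≤ pvScore fd ad food issues := by
  have gen : ∀ (l : List String), 0 ≤ (l.map (fun _ => (1 : Int))).sum := by
    intro l
    induction l with
    | nil => simp
    | cons x t ih => simpa using by omega
  exact gen _

-- max(xs, default=0) is the running max from 0 when all elements are nonnegative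
lemma maxD_nonneg (xs : List Int) (h : ∀ x ∈ xs, 0 ≤ x) :
    PySem.List.maxD xs (fun v => v) 0 = xs.foldl max 0 := by
  cases xs with
  | nil => simp [PySem.List.maxD, PySem.List.max?]
  | cons x t =>
    rw [PySem.List.maxD, PySem.List.max?_id_cons, Option.getD_some, List.foldl_cons]
    have hx : max 0 x = x := max_eq_right (h x (List.mem_cons_self ..))
    rw [hx]

-- a running max depends on the list only through membership
lemma foldl_max_mem_iff (l1 l2 : List Int) (a : Int) (h : ∀ x, x ∈ l1 ↔ x ∈ l2) :
    l1.foldl max a = l2.foldl max a := by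
  have side : ∀ (u v : List Int), (∀ x, x ∈ u ↔ x ∈ v) →
      u.foldl max a ≤ v.foldl max a := by
    intro u v huv
    rcases PySem.List.foldl_max_mem u a with heq | hmem
    · rw [heq]
      exact (PySem.List.le_foldl_max v a).1
    · exact (PySem.List.le_foldl_max v a).2 _ ((huv _).mp hmem)
  exact le_antisymm (side l1 l2 h) (side l2 l1 fun x => (h x).symm)

-- A's max-then-filter tail equals B's bucket tail, for any score function and any
-- food list with distinct names
lemma pvTail (sc : String × List String → Int) (hsc : ∀ fi, 0 ≤ sc fi)
    (items : List (String × List String)) (hnd : (items.map (fun p => p.1)).Nodup) :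
    ((items.foldl (fun d fi => d.insert fi.1 (sc fi))
        (PySem.Dict.empty : PySem.Dict String Int)).items.filter
      (fun p => decide (p.2 = PySem.List.maxD
          (items.foldl (fun d fi => d.insert fi.1 (sc fi))
            (PySem.Dict.empty : PySem.Dict String Int)).values (fun v => v) 0 ∧ 0 < p.2))).map
      (fun p => p.1)
      = (if 0 < PySem.List.maxD
              (items.foldl (fun b fi => b.modify (sc fi) [] (fun bl => bl ++ [fi.1]))
                (PySem.Dict.empty : PySem.Dict Int (List String))).keys (fun v => v) 0
          then (items.foldl (fun b fi => b.modify (sc fi) [] (fun bl => bl ++ [fi.1]))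
                (PySem.Dict.empty : PySem.Dict Int (List String))).getD
              (PySem.List.maxD
                (items.foldl (fun b fi => b.modify (sc fi) [] (fun bl => bl ++ [fi.1]))
                  (PySem.Dict.empty : PySem.Dict Int (List String))).keys (fun v => v) 0) []
          else []) := by
  have hitems :
      (items.foldl (fun d fi => d.insert fi.1 (sc fi))
        (PySem.Dict.empty : PySem.Dict String Int)).items
        = items.map (fun fi => (fi.1, sc fi)) := by
    rw [PySem.Dict.items_foldl_insert_fresh items (fun fi => fi.1) sc PySem.Dict.empty
        (fun a _ => PySem.Dict.contains_empty _) hnd]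
    rfl
  have hvals :
      (items.foldl (fun d fi => d.insert fi.1 (sc fi))
        (PySem.Dict.empty : PySem.Dict String Int)).values = items.map sc := by
    simp only [PySem.Dict.values, hitems, List.map_map]
    rfl
  have hbfold :
      items.foldl (fun b fi => b.modify (sc fi) [] (fun bl => bl ++ [fi.1]))
        (PySem.Dict.empty : PySem.Dict Int (List String))
        = (items.map (fun fi => (sc fi, fi.1))).foldl
            (fun d p => d.modify p.1 [] (fun bl => bl ++ [p.2])) PySem.Dict.empty := by
    rw [List.foldl_map]
  have hkeys :
      (items.foldl (fun b fi => b.modify (sc fi) [] (fun bl => bl ++ [fi.1]))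
        (PySem.Dict.empty : PySem.Dict Int (List String))).keys
        = PySem.Set.ofList (items.map sc) := by
    rw [PySem.Dict.keys_foldl_modify_key items (fun fi => sc fi) []
        (fun _ fi => fun bl => bl ++ [fi.1]) PySem.Dict.empty]
    simp [PySem.Set.update, PySem.Set.ofList_eq_foldl, PySem.Dict.keys_empty]
  have hM1 :
      PySem.List.maxD (items.foldl (fun d fi => d.insert fi.1 (sc fi))
        (PySem.Dict.empty : PySem.Dict String Int)).values (fun v => v) 0
        = (items.map sc).foldl max 0 := by
    rw [hvals, maxD_nonneg]
    intro x hx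
    obtain ⟨fi, _, rfl⟩ := List.mem_map.mp hx
    exact hsc fi
  have hM2 :
      PySem.List.maxD (items.foldl (fun b fi => b.modify (sc fi) [] (fun bl => bl ++ [fi.1]))
        (PySem.Dict.empty : PySem.Dict Int (List String))).keys (fun v => v) 0
        = (items.map sc).foldl max 0 := by
    rw [hkeys, maxD_nonneg]
    · exact foldl_max_mem_iff _ _ 0 (fun x => PySem.Set.mem_ofList (items.map sc) x)
    · intro x hx
      obtain ⟨fi, _, rfl⟩ := List.mem_map.mp ((PySem.Set.mem_ofList _ x).mp hx)
      exact hsc fi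
  have hgetD :
      (items.foldl (fun b fi => b.modify (sc fi) [] (fun bl => bl ++ [fi.1]))
        (PySem.Dict.empty : PySem.Dict Int (List String))).getD
          ((items.map sc).foldl max 0) []
        = (items.filter (fun fi => sc fi == (items.map sc).foldl max 0)).map
            (fun fi => fi.1) := by
    rw [hbfold, PySem.Dict.getD_foldl_modify_append]
    simp [List.filter_map, List.map_map, Function.comp_def]
  have hMnn : 0 ≤ (items.map sc).foldl max 0 := (PySem.List.le_foldl_max _ 0).1
  rw [hM1, hM2, hitems, List.filter_map, List.map_map]
  simp only [Function.comp_def]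
  by_cases hpos : 0 < (items.map sc).foldl max 0
  · rw [if_pos hpos, hgetD]
    have hfilt :
        items.filter
            (fun fi => decide (sc fi = (items.map sc).foldl max 0 ∧ 0 < sc fi))
          = items.filter (fun fi => sc fi == (items.map sc).foldl max 0) := by
      apply List.filter_congr
      intro fi _
      by_cases h : sc fi = (items.map sc).foldl max 0
      · simp [h, hpos]
      · simp [h]
    rw [hfilt]
  · rw [if_neg hpos]
    have hM0 : (items.map sc).foldl max 0 = 0 := by omega
    have hfilt :
        items.filter
            (fun fi => decide (sc fi = (items.map sc).foldl max 0 ∧ 0 < sc fi))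
          = [] := by
      apply List.filter_eq_nil_iff.mpr
      intro fi _
      simp only [hM0, decide_eq_true_eq]
      rintro ⟨h1, h2⟩
      omega
    rw [hfilt]
    rfl

-- ===== VERDICT (by name: the statement is the Claim_ definition above) =====
theorem find_probable_culprits_spec : Claim_equal_find_probable_culprits := by
  intro food_issue_map foods_dict allergies_dict daily_data _
  unfold Spec_find_probable_culprits find_probable_culprits find_probable_culprits_alt
  dsimp only
  simp only [altScore_eq]
  rw [PySem.List.foldl_prod_mk
      (f := fun (d : PySem.Dict String Int) (fi : String × List String) =>
        d.insert fi.1 (pvScore (PySem.Dict.ofList foods_dict) (PySem.Dict.ofList allergies_dict) fi.1 fi.2))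
      (g := fun (b : PySem.Dict Int (List String)) (fi : String × List String) =>
        b.modify (pvScore (PySem.Dict.ofList foods_dict) (PySem.Dict.ofList allergies_dict) fi.1 fi.2) []
          (fun bl => bl ++ [fi.1]))]
  dsimp only
  have hnd : (((PySem.Dict.ofList food_issue_map :
      PySem.Dict String (List String)).items).map (fun p => p.1)).Nodup := by
    have h := PySem.Dict.nodup_keys_ofList (ν := List String) food_issue_map
    simpa [PySem.Dict.keys] using h
  rw [pvTail
      (fun fi => pvScore (PySem.Dict.ofList foods_dict) (PySem.Dict.ofList allergies_dict) fi.1 fi.2)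
      (fun fi => pvScore_nonneg _ _ _ _)
      (PySem.Dict.ofList food_issue_map).items hnd]
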